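-- pv_equiv track=rewrite | github.com/Arskan17/Efficient-algorithms-for-checking-equivalence-of-compressed-strings | app.py | compute_lengths
-- ===== SOURCE A (Python) =====
-- def compute_lengths(grammar):
--     lengths = {}
--
--     def get_length(symbol):
--         if symbol in lengths:  # Memoization
--             return lengths[symbol]
--         if symbol not in grammar:  # Base case (it's a terminal)
--             return 1
--         lengths[symbol] = sum(get_length(s) for s in grammar[symbol])  # Recursive sum
--         return lengths[symbol]
--
--     for nonterminal in grammar:
--         get_length(nonterminal)  # Compute length for each nonterminal
--
--     return lengths
-- ===== SOURCE B (Python) =====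
-- def compute_lengths(grammar):
--     lengths = {}
--     for root in grammar:
--         if root in lengths:
--             continue
--         stack = [root]
--         while stack:
--             sym = stack[-1]
--             if sym in lengths:
--                 stack.pop()
--                 continue
--             total = 0
--             missing = None
--             for s in grammar[sym]:
--                 if s not in grammar:
--                     total += 1
--                 elif s in lengths:
--                     total += lengths[s]
--                 else:
--                     missing = s
--                     break
--             if missing is None:
--                 lengths[sym] = total
--                 stack.pop()
--             else:
--                 stack.append(missing)
--     return lengths
-- ===== Notes on version B (the rewrite author's own statement) =====
-- stated objective: alternative
-- what changed: A's memoized recursive helper (get_length calling itself over grammar[symbol]) is replaced by an iterative post-order DFS driven by an explicit work stack: a node is resolved and stored once all its children are known, children being pushed on the stack otherwise; only the lengths dict and the stack are maintained.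
import Mathlib
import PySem

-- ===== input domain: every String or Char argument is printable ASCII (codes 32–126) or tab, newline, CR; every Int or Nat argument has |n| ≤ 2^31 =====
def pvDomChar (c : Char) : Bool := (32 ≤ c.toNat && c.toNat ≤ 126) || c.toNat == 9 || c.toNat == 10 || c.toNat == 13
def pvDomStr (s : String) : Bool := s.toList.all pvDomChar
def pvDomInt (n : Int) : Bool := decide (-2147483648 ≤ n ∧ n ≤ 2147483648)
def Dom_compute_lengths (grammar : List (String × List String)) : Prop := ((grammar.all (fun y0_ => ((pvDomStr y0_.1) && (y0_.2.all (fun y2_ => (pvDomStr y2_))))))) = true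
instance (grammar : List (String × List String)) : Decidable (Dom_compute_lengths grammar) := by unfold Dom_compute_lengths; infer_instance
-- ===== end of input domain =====

-- B replaces A's memoized recursive helper by an explicit stack-driven post-order DFS (objective: alternative
-- decomposition, same asymptotic cost). Equivalence is about the returned dict as an insertion-ordered association list.

-- ===== PORT A =====
-- get_length and the generator sum, fuel-totalized: `none` = fuel exhausted (the fuel grammar.length + 1 is
-- proved sufficient under Pre_; in Python the corresponding exhaustion on cyclic grammars is RecursionError).
mutual
def pvGetLenA (d : PySem.Dict String (List String)) : Nat → String → PySem.Dict String Int → Option (Int × PySem.Dict String Int)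
  | 0, _, _ => none
  | f+1, sym, L =>
    match L.get? sym with
    | some v => some (v, L)
    | none =>
      match d.get? sym with
      | none => some (1, L)
      | some rhs =>
        match pvSumLenA d f rhs L with
        | none => none
        | some (s, L') => some (s, L'.insert sym s)
termination_by f _ _ => (f, 0)

def pvSumLenA (d : PySem.Dict String (List String)) : Nat → List String → PySem.Dict String Int → Option (Int × PySem.Dict String Int)
  | _, [], L => some (0, L)
  | f, c :: cs, L =>
    match pvGetLenA d f c L with
    | none => none
    | some (v, L1) =>
      match pvSumLenA d f cs L1 with
      | none => none
      | some (s, L2) => some (v + s, L2)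
termination_by f cs _ => (f, cs.length + 1)
end

def compute_lengths (grammar : List (String × List String)) : List (String × Int) :=
  let d := PySem.Dict.ofList grammar
  match d.keys.foldl (fun acc k =>
      match acc with
      | none => none
      | some L =>
        match pvGetLenA d (grammar.length + 1) k L with
        | none => none
        | some (_, L') => some L') (some PySem.Dict.empty) with
  | some L => L.items
  | none => []

-- ===== PORT B =====
-- the inner `for s in grammar[sym]` scan: (total so far, first unresolved nonterminal if any)
def pvScanB (d : PySem.Dict String (List String)) (L : PySem.Dict String Int) : List String → Int → Int × Option String
  | [], total => (total, none)
  | s :: rest, total =>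
    if d.contains s = false then pvScanB d L rest (total + 1)
    else
      match L.get? s with
      | some v => pvScanB d L rest (total + v)
      | none => (total, some s)

-- the `while stack` loop, fuel-totalized (`none` = fuel exhausted; the fuel below is proved sufficient under Pre_)
def pvLoopB (d : PySem.Dict String (List String)) : Nat → List String → PySem.Dict String Int → Option (PySem.Dict String Int)
  | _, [], L => some L
  | 0, _ :: _, _ => none
  | f+1, sym :: st, L =>
    if L.contains sym then pvLoopB d f st L
    else
      match d.get? sym with
      | none => none
      | some rhs =>
        match pvScanB d L rhs 0 with
        | (total, none) => pvLoopB d f st (L.insert sym total)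
        | (_, some c) => pvLoopB d f (c :: sym :: st) L

-- fuel bound for the while loop (R bounds every right-hand side's length, n the resolution rank)
def pvFuelB : Nat → Nat → Nat
  | _, 0 => 1
  | R, n+1 => 1 + R + R * pvFuelB R n

def compute_lengths_alt (grammar : List (String × List String)) : List (String × Int) :=
  let d := PySem.Dict.ofList grammar
  let fuel := pvFuelB ((grammar.map (fun p => p.2.length)).sum + 1) (d.keys.length + 1)
  match d.keys.foldl (fun acc root =>
      match acc with
      | none => none
      | some L => if L.contains root then some L else pvLoopB d fuel [root] L) (some PySem.Dict.empty) with
  | some L => L.items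
  | none => []

-- ===== PRECONDITION & SPEC =====
-- pvNext S = the keys all of whose children are terminals or members of S (one Kahn-style resolution step)
def pvNext (d : PySem.Dict String (List String)) (S : List String) : List String :=
  d.keys.filter (fun k => (d.getD k []).all (fun s => !d.contains s || S.contains s))
def pvSset (d : PySem.Dict String (List String)) : Nat → List String
  | 0 => []
  | n+1 => pvNext d (pvSset d n)

-- Pre_: the grammar's dependency graph is well-founded (acyclic): pvSset d n is the standard inductive
-- approximation of the well-founded part of the key-dependency graph (neither port computes it), and on a
-- grammar with K keys the well-founded part is exhausted after K steps, so Pre_ says every key is in it.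
-- These are exactly the grammars on which A's recursion terminates; on cyclic grammars A raises
-- RecursionError and returns nothing (and B's while loop never ends).
def Pre_compute_lengths (grammar : List (String × List String)) : Prop :=
  ∀ k ∈ (PySem.Dict.ofList grammar).keys,
    k ∈ pvSset (PySem.Dict.ofList grammar) (PySem.Dict.ofList grammar).keys.length

instance (grammar : List (String × List String)) : Decidable (Pre_compute_lengths grammar) := by
  unfold Pre_compute_lengths; infer_instance

def pvWitness_compute_lengths : (List (String × List String)) :=
  [("S", ["a", "T", "T"]), ("T", ["b", "c"])]

def Spec_compute_lengths (grammar : List (String × List String)) (out : List (String × Int)) : Prop := out = compute_lengths_alt grammar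
instance (grammar : List (String × List String)) (out : List (String × Int)) : Decidable (Spec_compute_lengths grammar out) := by unfold Spec_compute_lengths; infer_instance

-- ===== CLAIM (what is proved, stated in full; the proofs are below) =====
def Claim_equal_compute_lengths : Prop := ∀ (grammar : List (String × List String)), Dom_compute_lengths grammar → Pre_compute_lengths grammar → Spec_compute_lengths grammar (compute_lengths grammar)

-- ===== LEMMAS AND PROOFS =====

-- the exact expansion length at resolution rank n (stable from a symbol's rank upward, pvLenF_stable)
def pvLenF (d : PySem.Dict String (List String)) : Nat → String → Int
  | 0, _ => 1
  | f+1, s =>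
    match d.get? s with
    | none => 1
    | some rhs => (rhs.map (pvLenF d f)).sum

-- invariant of the memo dict shared by both programs
def pvInv (d : PySem.Dict String (List String)) (L : PySem.Dict String Int) : Prop :=
  L.keys.Nodup ∧ ∀ k v, L.get? k = some v →
    d.contains k = true ∧ ∃ n, k ∈ pvSset d n ∧ v = pvLenF d n k

theorem pvNext_mono (d : PySem.Dict String (List String)) {S S' : List String}
    (h : ∀ x ∈ S, x ∈ S') : ∀ x ∈ pvNext d S, x ∈ pvNext d S' := by
  intro x hx
  simp only [pvNext, List.mem_filter, List.all_eq_true, Bool.or_eq_true, Bool.not_eq_true',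
    List.contains_iff_mem] at hx ⊢
  exact ⟨hx.1, fun s hs => (hx.2 s hs).elim Or.inl (fun hm => Or.inr (h s hm))⟩

theorem pvSset_le_succ (d : PySem.Dict String (List String)) :
    ∀ n, ∀ x ∈ pvSset d n, x ∈ pvSset d (n+1) := by
  intro n
  induction n with
  | zero => intro x hx; simp [pvSset] at hx
  | succ n ih => exact pvNext_mono d ih

theorem mem_pvSset_succ (d : PySem.Dict String (List String)) {s : String} {n : Nat}
    (h : s ∈ pvSset d (n+1)) :
    s ∈ d.keys ∧ ∀ c ∈ d.getD s [], d.contains c = false ∨ c ∈ pvSset d n := by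
  simp only [pvSset, pvNext, List.mem_filter, List.all_eq_true, Bool.or_eq_true,
    Bool.not_eq_true', List.contains_iff_mem] at h
  exact ⟨h.1, fun c hc => h.2 c hc⟩

theorem pvLenF_terminal (d : PySem.Dict String (List String)) {s : String}
    (h : d.get? s = none) (f : Nat) : pvLenF d f s = 1 := by
  cases f <;> simp [pvLenF, h]

theorem pvLenF_stable (d : PySem.Dict String (List String)) {n : Nat} :
    ∀ {s : String}, s ∈ pvSset d n → ∀ m, n ≤ m → pvLenF d m s = pvLenF d n s := by
  induction n with
  | zero => intro s hs; simp [pvSset] at hs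
  | succ n ih =>
    intro s hs m hm
    obtain ⟨hk, hc⟩ := mem_pvSset_succ d hs
    have hcont : d.contains s = true := (PySem.Dict.contains_iff_mem_keys d s).2 hk
    obtain ⟨rhs, hrhs⟩ : ∃ rhs, d.get? s = some rhs := by
      rcases ho : d.get? s with _ | rhs
      · rw [PySem.Dict.get?_eq_none_iff_contains] at ho; rw [hcont] at ho; cases ho
      · exact ⟨rhs, rfl⟩
    have hgetD : d.getD s [] = rhs := PySem.Dict.getD_of_get?_eq_some d [] hrhs
    obtain ⟨m', rfl⟩ : ∃ m', m = m' + 1 := ⟨m - 1, by omega⟩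
    have hm' : n ≤ m' := by omega
    simp only [pvLenF, hrhs]
    congr 1
    apply List.map_congr_left
    intro c hcm
    rcases hc c (by rw [hgetD]; exact hcm) with hterm | hS
    · rw [pvLenF_terminal d ((PySem.Dict.get?_eq_none_iff_contains d c).2 hterm),
        pvLenF_terminal d ((PySem.Dict.get?_eq_none_iff_contains d c).2 hterm)]
    · exact (ih hS m' hm')

theorem pvLenF_rank_irrel (d : PySem.Dict String (List String)) {s : String} {n m : Nat}
    (hn : s ∈ pvSset d n) (hm : s ∈ pvSset d m) : pvLenF d n s = pvLenF d m s := by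
  rcases le_total n m with h | h
  · exact (pvLenF_stable d hn m h).symm
  · exact pvLenF_stable d hm n h

theorem pvFuelB_pos (R n : Nat) : 1 ≤ pvFuelB R n := by
  cases n with
  | zero => simp [pvFuelB]
  | succ n => simp only [pvFuelB]; omega

theorem pvFuelB_mono (R : Nat) (hR : 1 ≤ R) {n m : Nat} (h : n ≤ m) :
    pvFuelB R n ≤ pvFuelB R m := by
  induction h with
  | refl => exact le_refl _
  | @step k h ih =>
    refine le_trans ih ?_
    have h1 : pvFuelB R k ≤ R * pvFuelB R k := Nat.le_mul_of_pos_left _ (by omega)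
    simp only [pvFuelB]; omega

theorem pvScanB_resolved (d : PySem.Dict String (List String)) (L : PySem.Dict String Int) (n : Nat) :
    ∀ (rhs : List String) (t : Int),
    (∀ c ∈ rhs, d.contains c = false ∨ L.get? c = some (pvLenF d n c)) →
    pvScanB d L rhs t = (t + (rhs.map (pvLenF d n)).sum, none) := by
  intro rhs
  induction rhs with
  | nil => intro t _; simp [pvScanB]
  | cons c rest ih =>
    intro t h
    rcases hcd : d.contains c with _ | _
    · have h1 : pvLenF d n c = 1 :=
        pvLenF_terminal d ((PySem.Dict.get?_eq_none_iff_contains d c).2 hcd) n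
      rw [pvScanB, if_pos hcd, ih _ (fun x hx => h x (by simp [hx]))]
      simp only [List.map_cons, List.sum_cons, h1]
      rw [Prod.mk.injEq]; constructor; · ring
      rfl
    · have hres : L.get? c = some (pvLenF d n c) := by
        rcases h c (by simp) with hterm | hres
        · rw [hterm] at hcd; cases hcd
        · exact hres
      rw [pvScanB, if_neg (by simp [hcd]), hres]
      show pvScanB d L rest (t + pvLenF d n c) = _
      rw [ih _ (fun x hx => h x (by simp [hx]))]
      simp only [List.map_cons, List.sum_cons]
      rw [Prod.mk.injEq]; constructor; · ring
      rfl

theorem pvScanB_finds (d : PySem.Dict String (List String)) (L : PySem.Dict String Int) (n : Nat) :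
    ∀ (pre : List String) (c : String) (rest : List String) (t : Int),
    (∀ x ∈ pre, d.contains x = false ∨ L.get? x = some (pvLenF d n x)) →
    d.contains c = true → L.get? c = none →
    ∃ t', pvScanB d L (pre ++ c :: rest) t = (t', some c) := by
  intro pre
  induction pre with
  | nil =>
    intro c rest t _ hc hnone
    refine ⟨t, ?_⟩
    rw [List.nil_append, pvScanB, if_neg (by simp [hc]), hnone]
  | cons x pre' ih =>
    intro c rest t h hc hnone
    rcases hcd : d.contains x with _ | _
    · rw [List.cons_append, pvScanB, if_pos hcd]
      exact ih c rest _ (fun y hy => h y (by simp [hy])) hc hnone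
    · have hres : L.get? x = some (pvLenF d n x) := by
        rcases h x (by simp) with ht | hr
        · rw [ht] at hcd; cases hcd
        · exact hr
      rw [List.cons_append, pvScanB, if_neg (by simp [hcd]), hres]
      exact ih c rest _ (fun y hy => h y (by simp [hy])) hc hnone

theorem pv_items_foldl_sub (ps : List (String × List String)) :
    ∀ (d : PySem.Dict String (List String)) p,
      p ∈ (List.foldl (fun acc q => acc.insert q.1 q.2) d ps).items → p ∈ d.items ∨ p ∈ ps := by
  induction ps with
  | nil => intro d p hp; exact Or.inl hp
  | cons q qs ih =>
    intro d p hp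
    rcases ih _ p hp with h1 | h2
    · rcases (PySem.Dict.mem_items_insert d q.1 q.2 p).1 h1 with h3 | h3
      · right; simp [h3]
      · exact Or.inl h3.1
    · right; simp [h2]

theorem pv_items_ofList_sub (g : List (String × List String)) :
    ∀ p ∈ (PySem.Dict.ofList g).items, p ∈ g := by
  intro p hp
  rcases pv_items_foldl_sub g PySem.Dict.empty p hp with h | h
  · simp [PySem.Dict.empty] at h
  · exact h

theorem pv_items_foldl_len (ps : List (String × List String)) :
    ∀ (d : PySem.Dict String (List String)),
      (List.foldl (fun acc q => acc.insert q.1 q.2) d ps).items.length ≤ d.items.length + ps.length := by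
  induction ps with
  | nil => intro d; simp
  | cons q qs ih =>
    intro d
    refine le_trans (ih _) ?_
    have : (d.insert q.1 q.2).items.length ≤ d.items.length + 1 := by
      by_cases hc : d.contains q.1 = true
      · simp [PySem.Dict.insert, hc]
      · simp [PySem.Dict.insert, hc]
    simp only [List.length_cons]; omega

theorem pv_keys_ofList_le (g : List (String × List String)) :
    (PySem.Dict.ofList g).keys.length ≤ g.length := by
  have := pv_items_foldl_len g PySem.Dict.empty
  simp only [PySem.Dict.keys, List.length_map]
  simpa [PySem.Dict.ofList, PySem.Dict.update, PySem.Dict.empty] using this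

-- the heart: resolving one symbol — A's recursion returns (its length, L') while B's loop takes k steps
-- from stack (s :: st) to stack st arriving at the same memo dict L'
theorem pvMain (d : PySem.Dict String (List String)) (R : Nat)
    (hR : ∀ s rhs, d.get? s = some rhs → rhs.length ≤ R) (hR1 : 1 ≤ R) :
    ∀ n s L, (s ∈ pvSset d n ∨ d.contains s = false) → pvInv d L →
    ∃ L' k,
      (∀ f, n + 1 ≤ f → pvGetLenA d f s L = some (pvLenF d n s, L')) ∧
      pvInv d L' ∧
      (∀ x v, L.get? x = some v → L'.get? x = some v) ∧
      (∀ x, L'.contains x = true → L.contains x = true ∨ x ∈ pvSset d n) ∧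
      (d.contains s = true → L'.get? s = some (pvLenF d n s)) ∧
      k ≤ pvFuelB R n ∧
      (d.contains s = true → ∀ f st, pvLoopB d (f + k) (s :: st) L = pvLoopB d f st L') := by
  intro n
  induction n using Nat.strong_induction_on with
  | _ n IH =>
  intro s L hs hInv
  rcases hs with hS | hterm
  case inr =>
    -- terminal: A returns 1 without touching the dict; B never pushes a terminal
    have hds : d.get? s = none := (PySem.Dict.get?_eq_none_iff_contains d s).2 hterm
    have hLs : L.get? s = none := by
      rcases ho : L.get? s with _ | v
      · rfl
      · have := (hInv.2 s v ho).1; rw [this] at hterm; cases hterm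
    refine ⟨L, 0, ?_, hInv, fun x v h => h, fun x h => Or.inl h,
      ?_, Nat.zero_le _, ?_⟩
    · intro f hf
      obtain ⟨f', rfl⟩ : ∃ f', f = f' + 1 := ⟨f - 1, by omega⟩
      rw [pvLenF_terminal d hds]
      simp [pvGetLenA, hLs, hds]
    · intro hcontra; rw [hterm] at hcontra; cases hcontra
    · intro hcontra; rw [hterm] at hcontra; cases hcontra
  case inl =>
  rcases n with _ | n'
  · simp [pvSset] at hS
  by_cases hSn' : s ∈ pvSset d n'
  · -- not minimal: use the induction hypothesis at rank n'
    obtain ⟨L', k, hA, hI, hpres, hcb, hfin, hk, hB⟩ :=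
      IH n' (Nat.lt_succ_self n') s L (Or.inl hSn') hInv
    have hval : pvLenF d n' s = pvLenF d (n'+1) s := pvLenF_rank_irrel d hSn' hS
    refine ⟨L', k, ?_, hI, hpres,
      (fun x hx => (hcb x hx).imp_right (pvSset_le_succ d n' x)),
      (fun hcont => by rw [hfin hcont, hval]),
      le_trans hk (pvFuelB_mono R hR1 (Nat.le_succ n')), hB⟩
    intro f hf
    rw [hA f (by omega), hval]
  -- minimal case: s ∈ pvSset d (n'+1) \ pvSset d n'
  obtain ⟨hkey, hcraw⟩ := mem_pvSset_succ d hS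
  have hcont : d.contains s = true := (PySem.Dict.contains_iff_mem_keys d s).2 hkey
  obtain ⟨rhs, hrhs⟩ : ∃ rhs, d.get? s = some rhs := by
    rcases ho : d.get? s with _ | rhs
    · rw [PySem.Dict.get?_eq_none_iff_contains] at ho; rw [hcont] at ho; cases ho
    · exact ⟨rhs, rfl⟩
  have hc : ∀ c ∈ rhs, d.contains c = false ∨ c ∈ pvSset d n' := by
    intro c hcm
    exact hcraw c (by rw [PySem.Dict.getD_of_get?_eq_some d [] hrhs]; exact hcm)
  rcases hmemo : L.get? s with _ | v
  · -- no memo entry: the recursive sum / the stack iterations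
    have hsnotL : L.contains s = false := by
      rw [PySem.Dict.contains_eq_isSome_get?, hmemo]; rfl
    have FOLD : ∀ (suf pre : List String), rhs = pre ++ suf →
        ∀ L0, pvInv d L0 →
        (∀ x v, L.get? x = some v → L0.get? x = some v) →
        (∀ x, L0.contains x = true → L.contains x = true ∨ x ∈ pvSset d n') →
        (∀ x ∈ pre, d.contains x = false ∨ L0.get? x = some (pvLenF d n' x)) →
        ∃ L1 k1,
          (∀ f, n' + 1 ≤ f → pvSumLenA d f suf L0 = some ((suf.map (pvLenF d n')).sum, L1)) ∧
          pvInv d L1 ∧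
          (∀ x v, L0.get? x = some v → L1.get? x = some v) ∧
          (∀ x, L1.contains x = true → L0.contains x = true ∨ x ∈ pvSset d n') ∧
          (∀ x ∈ pre ++ suf, d.contains x = false ∨ L1.get? x = some (pvLenF d n' x)) ∧
          k1 ≤ suf.length * (1 + pvFuelB R n') ∧
          (∀ f st, pvLoopB d (f + k1) (s :: st) L0 = pvLoopB d f (s :: st) L1) := by
      intro suf
      induction suf with
      | nil =>
        intro pre hsplit L0 hI0 hpres0 hcb0 hpre0
        refine ⟨L0, 0, ?_, hI0, fun x v h => h, fun x h => Or.inl h, ?_, Nat.zero_le _, ?_⟩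
        · intro f _; simp [pvSumLenA]
        · intro x hx; exact hpre0 x (by simpa using hx)
        · intro f st; rw [Nat.add_zero]
      | cons c suf' ihs =>
        intro pre hsplit L0 hI0 hpres0 hcb0 hpre0
        have hs0 : L0.contains s = false := by
          rcases hcs : L0.contains s with _ | _
          · rfl
          · rcases hcb0 s hcs with h1 | h1
            · rw [hsnotL] at h1; cases h1
            · exact absurd h1 hSn'
        have hcchild : d.contains c = false ∨ c ∈ pvSset d n' :=
          hc c (by rw [hsplit]; exact List.mem_append_right _ (by simp))
        -- resolve the child c: (Lc, kstep) with the three shared facts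
        obtain ⟨Lc, kstep, hAc, hIc, hpresc, hcbc, hresc, hkc, hBc⟩ :
            ∃ Lc kstep,
              (∀ f, n' + 1 ≤ f → pvGetLenA d f c L0 = some (pvLenF d n' c, Lc)) ∧
              pvInv d Lc ∧
              (∀ x v, L0.get? x = some v → Lc.get? x = some v) ∧
              (∀ x, Lc.contains x = true → L0.contains x = true ∨ x ∈ pvSset d n') ∧
              (d.contains c = false ∨ Lc.get? c = some (pvLenF d n' c)) ∧
              kstep ≤ 1 + pvFuelB R n' ∧
              (∀ f st, pvLoopB d (f + kstep) (s :: st) L0 = pvLoopB d f (s :: st) Lc) := by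
          rcases hm0 : L0.get? c with _ | v0
          · rcases Bool.eq_false_or_eq_true (d.contains c) with hcd | hcd
            · -- unresolved nonterminal child: push it (1 step) and run it (kc steps)
              have hcS : c ∈ pvSset d n' := by
                rcases hcchild with h1 | h1
                · rw [hcd] at h1; cases h1
                · exact h1
              obtain ⟨Lc, kc, hAc, hIc, hpresc, hcbc, hfinc, hkc, hBc⟩ :=
                IH n' (Nat.lt_succ_self n') c L0 (Or.inl hcS) hI0
              refine ⟨Lc, kc + 1, hAc, hIc, hpresc, hcbc, Or.inr (hfinc hcd), by omega, ?_⟩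
              intro f st
              have hrhs' : d.get? s = some (pre ++ c :: suf') := by rw [← hsplit]; exact hrhs
              have hstep : pvLoopB d ((f + kc) + 1) (s :: st) L0 = pvLoopB d (f + kc) (c :: s :: st) L0 := by
                obtain ⟨t', hscan⟩ := pvScanB_finds d L0 n' pre c suf' 0 hpre0 hcd hm0
                simp [pvLoopB, hs0, hrhs', hscan]
              have harith : f + (kc + 1) = (f + kc) + 1 := by omega
              rw [harith, hstep]
              exact hBc hcd f (s :: st)
            · -- terminal child: A returns 1, B's scan counts it without an iteration
              have hdc : d.get? c = none := (PySem.Dict.get?_eq_none_iff_contains d c).2 hcd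
              refine ⟨L0, 0, ?_, hI0, fun x v h => h, fun x h => Or.inl h,
                Or.inl hcd, Nat.zero_le _, fun f st => by rw [Nat.add_zero]⟩
              intro f hf
              obtain ⟨f', rfl⟩ : ∃ f', f = f' + 1 := ⟨f - 1, by omega⟩
              rw [pvLenF_terminal d hdc]
              simp [pvGetLenA, hm0, hdc]
          · -- child already memoized: A returns the stored value, B's scan skips it
            obtain ⟨hdc, m, hm, hv⟩ := hI0.2 c v0 hm0
            have hcS : c ∈ pvSset d n' := by
              rcases hcchild with h1 | h1
              · rw [hdc] at h1; cases h1
              · exact h1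
            have hveq : v0 = pvLenF d n' c := by rw [hv]; exact pvLenF_rank_irrel d hm hcS
            refine ⟨L0, 0, ?_, hI0, fun x v h => h, fun x h => Or.inl h,
              Or.inr (by rw [hm0, hveq]), Nat.zero_le _, fun f st => by rw [Nat.add_zero]⟩
            intro f hf
            obtain ⟨f', rfl⟩ : ∃ f', f = f' + 1 := ⟨f - 1, by omega⟩
            simp [pvGetLenA, hm0, hveq]
        -- continue with the rest of the children
        obtain ⟨L1, k1', hA1, hI1, hpres1, hcb1, hres1, hk1, hB1⟩ :=
          ihs (pre ++ [c]) (by rw [hsplit, List.append_assoc]; rfl) Lc hIc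
            (fun x v h => hpresc x v (hpres0 x v h))
            (fun x h => (hcbc x h).elim (fun h2 => hcb0 x h2) Or.inr)
            (by
              intro x hx
              rcases List.mem_append.1 hx with h1 | h1
              · rcases hpre0 x h1 with h2 | h2
                · exact Or.inl h2
                · exact Or.inr (hpresc x _ h2)
              · have : x = c := by simpa using h1
                subst this; exact hresc)
        refine ⟨L1, kstep + k1', ?_, hI1,
          (fun x v h => hpres1 x v (hpresc x v h)),
          (fun x h => (hcb1 x h).elim (fun h2 => hcbc x h2) Or.inr),
          ?_, ?_, ?_⟩
        · intro f hf
          have h1 := hAc f hf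
          have h2 := hA1 f hf
          simp [pvSumLenA, h1, h2]
        · intro x hx
          apply hres1 x
          rw [List.append_assoc]
          simpa using hx
        · have hlc : (c :: suf').length = suf'.length + 1 := rfl
          rw [hlc, Nat.add_mul, Nat.one_mul]
          omega
        · intro f st
          have harith : f + (kstep + k1') = (f + k1') + kstep := by omega
          rw [harith, hBc (f + k1') st]
          exact hB1 f st
    obtain ⟨L1, k1, hA1, hI1, hpres1, hcb1, hres1, hk1, hB1⟩ :=
      FOLD rhs [] rfl L hInv (fun x v h => h) (fun x h => Or.inl h) (by simp)
    have hres1' : ∀ x ∈ rhs, d.contains x = false ∨ L1.get? x = some (pvLenF d n' x) := by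
      intro x hx; exact hres1 x (by simpa using hx)
    have hlen : pvLenF d (n'+1) s = (rhs.map (pvLenF d n')).sum := by
      simp [pvLenF, hrhs]
    have hs1 : L1.contains s = false := by
      rcases Bool.eq_false_or_eq_true (L1.contains s) with hcs | hcs
      · rcases hcb1 s hcs with h1 | h1
        · rw [hsnotL] at h1; cases h1
        · exact absurd h1 hSn'
      · exact hcs
    refine ⟨L1.insert s ((rhs.map (pvLenF d n')).sum), k1 + 1, ?_, ?_, ?_, ?_, ?_, ?_, ?_⟩
    · intro f hf
      obtain ⟨f', rfl⟩ : ∃ f', f = f' + 1 := ⟨f - 1, by omega⟩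
      have h1 := hA1 f' (by omega)
      simp [pvGetLenA, hmemo, hrhs, h1, hlen]
    · constructor
      · exact PySem.Dict.nodup_keys_insert _ _ _ hI1.1
      · intro k v hkv
        rw [PySem.Dict.get?_insert] at hkv
        by_cases hks : k = s
        · subst hks
          rw [if_pos rfl] at hkv
          have hv : v = (rhs.map (pvLenF d n')).sum := by
            injection hkv with h; exact h.symm
          exact ⟨hcont, n'+1, hS, by rw [hv, hlen]⟩
        · rw [if_neg hks] at hkv; exact hI1.2 k v hkv
    · intro x v h
      have hxs : x ≠ s := by
        intro he; subst he; rw [hmemo] at h; cases h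
      rw [PySem.Dict.get?_insert, if_neg hxs]
      exact hpres1 x v h
    · intro x hx
      rw [PySem.Dict.contains_insert] at hx
      rcases Bool.or_eq_true_iff.1 hx with h1 | h1
      · have : x = s := by simpa using h1
        subst this; exact Or.inr hS
      · exact (hcb1 x h1).imp_right (pvSset_le_succ d n' x)
    · intro _
      rw [PySem.Dict.get?_insert_self, hlen]
    · have hrl : rhs.length ≤ R := hR s rhs hrhs
      have hmul : rhs.length * (1 + pvFuelB R n') ≤ R * (1 + pvFuelB R n') :=
        Nat.mul_le_mul_right _ hrl
      have hx : R * (1 + pvFuelB R n') = R + R * pvFuelB R n' := by ring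
      simp only [pvFuelB]
      omega
    · intro _ f st
      have harith : f + (k1 + 1) = (f + 1) + k1 := by omega
      rw [harith, hB1 (f+1) st]
      have hscan := pvScanB_resolved d L1 n' rhs 0 hres1'
      simp [pvLoopB, hs1, hrhs, hscan]
  · -- memoization hit
    obtain ⟨_, m, hm, hv⟩ := hInv.2 s v hmemo
    have hveq : v = pvLenF d (n'+1) s := by rw [hv]; exact pvLenF_rank_irrel d hm hS
    have hLcont : L.contains s = true := by
      rw [PySem.Dict.contains_eq_isSome_get?, hmemo]; rfl
    refine ⟨L, 1, ?_, hInv, fun x v h => h, fun x h => Or.inl h,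
      fun _ => by rw [hmemo, hveq], pvFuelB_pos R _, ?_⟩
    · intro f hf
      obtain ⟨f', rfl⟩ : ∃ f', f = f' + 1 := ⟨f - 1, by omega⟩
      simp [pvGetLenA, hmemo, hveq]
    · intro _ f st
      show pvLoopB d (f + 1) (s :: st) L = _
      rw [pvLoopB, if_pos hLcont]

theorem pv_mem_keys_of_mem_pvSset (d : PySem.Dict String (List String)) :
    ∀ n x, x ∈ pvSset d n → x ∈ d.keys := by
  intro n x hx
  cases n with
  | zero => simp [pvSset] at hx
  | succ n => exact (mem_pvSset_succ d hx).1

-- both top-level loops over the grammar's keys thread the same memo dict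
theorem pvOuter (d : PySem.Dict String (List String)) (F R FB : Nat)
    (hR : ∀ s rhs, d.get? s = some rhs → rhs.length ≤ R) (hR1 : 1 ≤ R)
    (hNF : d.keys.length + 1 ≤ F) (hFB : pvFuelB R d.keys.length ≤ FB) :
    ∀ ks L, (∀ k ∈ ks, k ∈ pvSset d d.keys.length) → pvInv d L →
    ∃ L',
      (List.foldl (fun acc k =>
        match acc with
        | none => none
        | some L =>
          match pvGetLenA d F k L with
          | none => none
          | some (_, L') => some L') (some L) ks = some L') ∧
      (List.foldl (fun acc root =>
        match acc with
        | none => none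
        | some L => if L.contains root then some L else pvLoopB d FB [root] L) (some L) ks = some L') ∧
      pvInv d L' := by
  intro ks
  induction ks with
  | nil => intro L _ hI; exact ⟨L, rfl, rfl, hI⟩
  | cons k ks ih =>
    intro L hks hI
    have hkS : k ∈ pvSset d d.keys.length := hks k (by simp)
    have hkey : k ∈ d.keys := pv_mem_keys_of_mem_pvSset d _ k hkS
    have hcontk : d.contains k = true := (PySem.Dict.contains_iff_mem_keys d k).2 hkey
    rcases Bool.eq_false_or_eq_true (L.contains k) with hck | hck
    · -- already computed: A's memo hit, B's `continue`
      have hv' : (L.get? k).isSome = true := by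
        rw [← PySem.Dict.contains_eq_isSome_get?]; exact hck
      obtain ⟨v, hv⟩ := Option.isSome_iff_exists.mp hv'
      obtain ⟨L', h1, h2, h3⟩ := ih L (fun x hx => hks x (by simp [hx])) hI
      refine ⟨L', ?_, ?_, h3⟩
      · rw [List.foldl_cons]
        obtain ⟨F', hF'⟩ : ∃ F', F = F' + 1 := ⟨F - 1, by omega⟩
        subst hF'
        simpa [pvGetLenA, hv] using h1
      · rw [List.foldl_cons]
        simpa [hck] using h2
    · -- fresh: one full resolution on both sides lands in the same dict
      obtain ⟨L', kk, hA, hI', hpres, hcb, hfin, hkb, hB⟩ :=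
        pvMain d R hR hR1 d.keys.length k L (Or.inl hkS) hI
      have hkkFB : kk ≤ FB := le_trans hkb hFB
      obtain ⟨L'', h1, h2, h3⟩ := ih L' (fun x hx => hks x (by simp [hx])) hI'
      refine ⟨L'', ?_, ?_, h3⟩
      · rw [List.foldl_cons]
        have hA' := hA F (by omega)
        simpa [hA'] using h1
      · rw [List.foldl_cons]
        have hrun : pvLoopB d FB [k] L = some L' := by
          have := hB hcontk (FB - kk) []
          rw [Nat.sub_add_cancel hkkFB] at this
          rw [this, pvLoopB]
        simpa [hck, hrun] using h2

-- ===== VERDICT (by name: the statement is the Claim_ definition above) =====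
theorem compute_lengths_spec : Claim_equal_compute_lengths := by
  unfold Claim_equal_compute_lengths Spec_compute_lengths
  intro grammar _ hpre
  unfold compute_lengths compute_lengths_alt
  simp only []
  set d := PySem.Dict.ofList grammar with hd
  set R := (grammar.map (fun p => p.2.length)).sum + 1 with hRdef
  have hR1 : 1 ≤ R := Nat.le_add_left 1 _
  have hR : ∀ s rhs, d.get? s = some rhs → rhs.length ≤ R := by
    intro s rhs h
    have hmem : (s, rhs) ∈ grammar :=
      pv_items_ofList_sub grammar _ (PySem.Dict.mem_items_of_get?_eq_some d h)
    have : rhs.length ∈ grammar.map (fun p => p.2.length) :=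
      List.mem_map.2 ⟨(s, rhs), hmem, rfl⟩
    have hle := List.single_le_sum (fun x _ => Nat.zero_le x) _ this
    omega
  have hNF : d.keys.length + 1 ≤ grammar.length + 1 := by
    have h0 : d.keys.length ≤ grammar.length := by rw [hd]; exact pv_keys_ofList_le grammar
    omega
  have hFB : pvFuelB R d.keys.length ≤ pvFuelB R (d.keys.length + 1) :=
    pvFuelB_mono R hR1 (Nat.le_succ _)
  have hIemp : pvInv d PySem.Dict.empty := by
    constructor
    · simp [PySem.Dict.empty, PySem.Dict.keys]
    · intro k v h
      rw [PySem.Dict.get?_empty] at h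
      cases h
  obtain ⟨L', h1, h2, _⟩ :=
    pvOuter d (grammar.length + 1) R (pvFuelB R (d.keys.length + 1)) hR hR1 hNF hFB
      d.keys PySem.Dict.empty hpre hIemp
  rw [h1, h2]
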